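-- pv_equiv track=rewrite | github.com/lastmyle/maestro-tuya-ir | app/core/ir_protocols/samsung.py | calcSectionChecksum
-- ===== SOURCE A (Python) =====
-- from typing import List
--
-- def calcSectionChecksum(section: List[int]) -> int:
--     def countBits(data, bits):
--         """Count the number of bits set"""
--         count = 0
--         for i in range(bits):
--             if data & (1 << i):
--                 count += 1
--         return count
--
--     kLowNibble = 0
--     kNibbleSize = 4
--     kHighNibble = 4
--
--     sum_val = 0
--
--     sum_val += countBits(section[0], 8)  # Include the entire first byte
--     # The lower half of the second byte.
--     sum_val += countBits((section[1] >> kLowNibble) & 0x0F, 8)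
--     # The upper half of the third byte.
--     sum_val += countBits((section[2] >> kHighNibble) & 0x0F, 8)
--     # The next 4 bytes.
--     for i in range(3, 7):
--         sum_val += countBits(section[i], 8)
--     # Bitwise invert the result.
--     return sum_val ^ 0xFF
-- ===== SOURCE B (Python) =====
-- def calcSectionChecksum(section):
--     # Pack the selected bit-fields into one base-256 integer and take a single
--     # popcount of it; 255 - count equals the XOR-inversion since count < 256.
--     fields = [
--         section[0] & 0xFF,
--         section[1] & 0x0F,
--         (section[2] >> 4) & 0x0F,
--         section[3] & 0xFF,
--         section[4] & 0xFF,
--         section[5] & 0xFF,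
--         section[6] & 0xFF,
--     ]
--     combined = 0
--     for f in fields:
--         combined = combined * 256 + f
--     return 255 - bin(combined).count("1")
-- ===== Notes on version B (the rewrite author's own statement) =====
-- stated objective: alternative
-- what changed: Instead of summing seven per-byte popcounts computed by an 8-position bit-test loop and XOR-inverting, B packs the selected byte-masked fields into a single base-256 integer with a fold and takes one popcount of that integer (bin().count('1')), returning 255 - count, which equals the XOR inversion because the count is below 256.
import Mathlib
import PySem

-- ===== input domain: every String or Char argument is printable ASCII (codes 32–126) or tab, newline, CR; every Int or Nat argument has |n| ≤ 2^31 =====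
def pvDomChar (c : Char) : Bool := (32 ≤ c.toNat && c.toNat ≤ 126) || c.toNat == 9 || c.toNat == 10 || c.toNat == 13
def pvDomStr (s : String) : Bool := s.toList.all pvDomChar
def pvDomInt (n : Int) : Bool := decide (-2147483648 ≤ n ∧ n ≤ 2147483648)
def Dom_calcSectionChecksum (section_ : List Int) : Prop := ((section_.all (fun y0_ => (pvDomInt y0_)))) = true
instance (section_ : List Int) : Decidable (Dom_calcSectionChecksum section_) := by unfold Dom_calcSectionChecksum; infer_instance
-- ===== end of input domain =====

-- B packs the selected byte-masked fields into one base-256 integer with a fold and takes a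
-- single popcount of it, returning 255 - count (= the XOR inversion, as count < 256).
-- Objective: alternative (same cost, different algorithm).

-- ===== PORT A =====
-- countBits(data, bits): loop over bit positions, test data & (1 << i)
def pvCountBits (data : Int) (bits : Int) : Int :=
  (PySem.List.pyRange 0 bits 1).foldl
    (fun count i => if PySem.Int.band data ((1 : Int) <<< i.toNat) ≠ 0 then count + 1 else count) 0

def calcSectionChecksum (section_ : List Int) : Int :=
  let sum0 := 0 + pvCountBits (PySem.List.pyGetD section_ 0 0) 8
  let sum1 := sum0 + pvCountBits (PySem.Int.band ((PySem.List.pyGetD section_ 1 0) >>> (0 : Nat)) 15) 8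
  let sum2 := sum1 + pvCountBits (PySem.Int.band ((PySem.List.pyGetD section_ 2 0) >>> (4 : Nat)) 15) 8
  let sum3 := (PySem.List.pyRange 3 7 1).foldl
    (fun s i => s + pvCountBits (PySem.List.pyGetD section_ i 0) 8) sum2
  PySem.Int.bxor sum3 255

-- ===== PORT B =====
-- bin(n).count("1") for nonnegative n = number of 1s in the binary expansion; computed with
-- fuel = n itself (n/2 < n each step, so the fuel never runs out before n = 0: exact there).
def pvBinGo (fuel n : Nat) : Int :=
  match fuel with
  | 0 => 0
  | f + 1 => if n = 0 then 0 else ((n % 2 : Nat) : Int) + pvBinGo f (n / 2)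

def pvBinOnes (n : Nat) : Int := pvBinGo n n

def calcSectionChecksum_alt (section_ : List Int) : Int :=
  let fields : List Int := [
    PySem.Int.band (PySem.List.pyGetD section_ 0 0) 255,
    PySem.Int.band (PySem.List.pyGetD section_ 1 0) 15,
    PySem.Int.band ((PySem.List.pyGetD section_ 2 0) >>> (4 : Nat)) 15,
    PySem.Int.band (PySem.List.pyGetD section_ 3 0) 255,
    PySem.Int.band (PySem.List.pyGetD section_ 4 0) 255,
    PySem.Int.band (PySem.List.pyGetD section_ 5 0) 255,
    PySem.Int.band (PySem.List.pyGetD section_ 6 0) 255]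
  let combined := fields.foldl (fun acc f => acc * 256 + f) 0
  -- combined is nonnegative (each field is a nonnegative mask result), so
  -- bin(combined).count("1") is exactly the popcount of combined.toNat
  255 - pvBinOnes combined.toNat

-- ===== PRECONDITION & SPEC =====
-- A raises IndexError when the list has fewer than 7 elements (it reads section[0..6]).
def Pre_calcSectionChecksum (section_ : List Int) : Prop := 7 ≤ section_.length
instance (section_ : List Int) : Decidable (Pre_calcSectionChecksum section_) := by
  unfold Pre_calcSectionChecksum; infer_instance

def pvWitness_calcSectionChecksum : List Int := [255, 18, 52, 86, 120, 154, 188]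

def Spec_calcSectionChecksum (section_ : List Int) (out : Int) : Prop := out = calcSectionChecksum_alt section_
instance (section_ : List Int) (out : Int) : Decidable (Spec_calcSectionChecksum section_ out) := by
  unfold Spec_calcSectionChecksum; infer_instance

-- ===== CLAIM (what is proved, stated in full; the proofs are below) =====
def Claim_equal_calcSectionChecksum : Prop := ∀ (section_ : List Int), Dom_calcSectionChecksum section_ → Pre_calcSectionChecksum section_ → Spec_calcSectionChecksum section_ (calcSectionChecksum section_)

-- ===== LEMMAS AND PROOFS =====

-- a mask M with bits inside the low byte (255 & M = M) only sees n mod 256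
lemma nat_and_mod256 (n M : Nat) (hM : 255 &&& M = M) : n &&& M = (n % 256) &&& M := by
  apply Nat.eq_of_testBit_eq
  intro i
  have hMi : M.testBit i = true → i < 8 := by
    intro h
    by_contra hge
    have h2 : (255 &&& M).testBit i = false := by
      rw [Nat.testBit_and, (by norm_num : (255:Nat) = 2^8-1), Nat.testBit_two_pow_sub_one]
      simp
      omega
    rw [hM, h] at h2
    simp at h2
  rw [Nat.testBit_and, Nat.testBit_and, (by norm_num : (256:Nat) = 2^8), Nat.testBit_mod_two_pow]
  by_cases hMt : M.testBit i = true
  · simp [hMt, hMi hMt]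
  · simp [Bool.eq_false_iff.mpr hMt]

-- Python's x & 255 is x mod 256, for either sign of x
set_option maxRecDepth 4000 in
lemma band255_eq_emod (x : Int) : PySem.Int.band x 255 = x % 256 := by
  rcases Int.lt_or_le x 0 with hx | hx
  · rw [PySem.Int.band]
    simp only [if_neg (by omega : ¬ (0:Int) ≤ x), if_pos (by norm_num : (0:Int) ≤ 255)]
    set m := (-x - 1).toNat with hm
    have hmx : (m : Int) = -x - 1 := by omega
    have h1 : (255 : Int).toNat &&& m = m % 256 := by
      have h0 := nat_and_mod256 m 255 (by decide)
      have h2 : ∀ r, r < 256 → r &&& 255 = r := by decide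
      rw [show ((255:Int).toNat = 255) from rfl, Nat.and_comm, h0,
          h2 _ (Nat.mod_lt _ (by norm_num))]
    rw [h1]
    have hlt : m % 256 < 256 := Nat.mod_lt _ (by norm_num)
    have hcast : (m : Int) % 256 = ((m % 256 : Nat) : Int) := by push_cast; ring
    omega
  · rw [PySem.Int.band]
    simp only [if_pos hx, if_pos (by norm_num : (0:Int) ≤ 255)]
    have h1 : x.toNat &&& (255 : Int).toNat = x.toNat % 256 := by
      have h0 := nat_and_mod256 x.toNat 255 (by decide)
      have h2 : ∀ r, r < 256 → r &&& 255 = r := by decide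
      rw [show ((255:Int).toNat = 255) from rfl, h0, h2 _ (Nat.mod_lt _ (by norm_num))]
    rw [h1]
    omega

-- a mask M with bits inside the low nibble (15 & M = M) only sees n mod 16
lemma nat_and_mod16 (n M : Nat) (hM : 15 &&& M = M) : n &&& M = (n % 16) &&& M := by
  apply Nat.eq_of_testBit_eq
  intro i
  have hMi : M.testBit i = true → i < 4 := by
    intro h
    by_contra hge
    have h2 : (15 &&& M).testBit i = false := by
      rw [Nat.testBit_and, (by norm_num : (15:Nat) = 2^4-1), Nat.testBit_two_pow_sub_one]
      simp
      omega
    rw [hM, h] at h2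
    simp at h2
  rw [Nat.testBit_and, Nat.testBit_and, (by norm_num : (16:Nat) = 2^4), Nat.testBit_mod_two_pow]
  by_cases hMt : M.testBit i = true
  · simp [hMt, hMi hMt]
  · simp [Bool.eq_false_iff.mpr hMt]

-- Python's x & 15 is x mod 16, for either sign of x
set_option maxRecDepth 4000 in
lemma band15_eq_emod (x : Int) : PySem.Int.band x 15 = x % 16 := by
  rcases Int.lt_or_le x 0 with hx | hx
  · rw [PySem.Int.band]
    simp only [if_neg (by omega : ¬ (0:Int) ≤ x), if_pos (by norm_num : (0:Int) ≤ 15)]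
    set m := (-x - 1).toNat with hm
    have hmx : (m : Int) = -x - 1 := by omega
    have h1 : (15 : Int).toNat &&& m = m % 16 := by
      have h0 := nat_and_mod16 m 15 (by decide)
      have h2 : ∀ r, r < 16 → r &&& 15 = r := by decide
      rw [show ((15:Int).toNat = 15) from rfl, Nat.and_comm, h0,
          h2 _ (Nat.mod_lt _ (by norm_num))]
    rw [h1]
    have hlt : m % 16 < 16 := Nat.mod_lt _ (by norm_num)
    have hcast : (m : Int) % 16 = ((m % 16 : Nat) : Int) := by push_cast; ring
    omega
  · rw [PySem.Int.band]
    simp only [if_pos hx, if_pos (by norm_num : (0:Int) ≤ 15)]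
    have h1 : x.toNat &&& (15 : Int).toNat = x.toNat % 16 := by
      have h0 := nat_and_mod16 x.toNat 15 (by decide)
      have h2 : ∀ r, r < 16 → r &&& 15 = r := by decide
      rw [show ((15:Int).toNat = 15) from rfl, h0, h2 _ (Nat.mod_lt _ (by norm_num))]
    rw [h1]
    omega

-- masking with a low-byte mask commutes with reducing x mod 256
set_option maxRecDepth 4000 in
lemma band_emod256 (x : Int) (M : Nat) (hM : 255 &&& M = M)
    (hsub : ∀ r, r < 256 → M - (M &&& r) = (255 - r) &&& M) :
    PySem.Int.band x (M : Int) = PySem.Int.band (x % 256) (M : Int) := by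
  have hMnn : (0 : Int) ≤ (M : Int) := by positivity
  have hMtoNat : ((M : Int)).toNat = M := by omega
  have hx' : (0 : Int) ≤ x % 256 := Int.emod_nonneg x (by norm_num)
  rcases Int.lt_or_le x 0 with hx | hx
  · rw [PySem.Int.band, PySem.Int.band]
    simp only [if_neg (by omega : ¬ (0:Int) ≤ x), if_pos hx', if_pos hMnn, hMtoNat]
    set m := (-x - 1).toNat with hm
    have hmx : (m : Int) = -x - 1 := by omega
    have hmod : (x % 256).toNat = 255 - m % 256 := by
      have hcast : (m : Int) % 256 = ((m % 256 : Nat) : Int) := by push_cast; ring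
      have hlt : m % 256 < 256 := Nat.mod_lt _ (by norm_num)
      omega
    rw [hmod]
    have hMm : M &&& m = M &&& (m % 256) := by
      rw [Nat.and_comm, nat_and_mod256 _ _ hM, Nat.and_comm]
    rw [hMm, ← hsub (m % 256) (Nat.mod_lt _ (by norm_num))]
  · rw [PySem.Int.band, PySem.Int.band]
    simp only [if_pos hx, if_pos hx', if_pos hMnn, hMtoNat]
    have h1 : (x % 256).toNat = x.toNat % 256 := by omega
    rw [h1, ← nat_and_mod256 _ _ hM]

-- A's bit-position loop only sees the low byte of its argument
set_option maxRecDepth 4000 in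
lemma countBits_emod (x : Int) : pvCountBits x 8 = pvCountBits (x % 256) 8 := by
  have hr : PySem.List.pyRange 0 8 1 = [0, 1, 2, 3, 4, 5, 6, 7] := by decide
  simp only [pvCountBits, hr, List.foldl]
  rw [(by decide : (1 : Int) <<< ((Int.toNat 0 : Nat) : Int) = ((2 ^ 0 : Nat) : Int)),
      (by decide : (1 : Int) <<< ((Int.toNat 1 : Nat) : Int) = ((2 ^ 1 : Nat) : Int)),
      (by decide : (1 : Int) <<< ((Int.toNat 2 : Nat) : Int) = ((2 ^ 2 : Nat) : Int)),
      (by decide : (1 : Int) <<< ((Int.toNat 3 : Nat) : Int) = ((2 ^ 3 : Nat) : Int)),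
      (by decide : (1 : Int) <<< ((Int.toNat 4 : Nat) : Int) = ((2 ^ 4 : Nat) : Int)),
      (by decide : (1 : Int) <<< ((Int.toNat 5 : Nat) : Int) = ((2 ^ 5 : Nat) : Int)),
      (by decide : (1 : Int) <<< ((Int.toNat 6 : Nat) : Int) = ((2 ^ 6 : Nat) : Int)),
      (by decide : (1 : Int) <<< ((Int.toNat 7 : Nat) : Int) = ((2 ^ 7 : Nat) : Int))]
  rw [band_emod256 x (2^0) (by decide) (by decide),
      band_emod256 x (2^1) (by decide) (by decide),
      band_emod256 x (2^2) (by decide) (by decide),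
      band_emod256 x (2^3) (by decide) (by decide),
      band_emod256 x (2^4) (by decide) (by decide),
      band_emod256 x (2^5) (by decide) (by decide),
      band_emod256 x (2^6) (by decide) (by decide),
      band_emod256 x (2^7) (by decide) (by decide)]

-- on a byte, A's 8-position bit loop computes the binary popcount (checked over all 256 values)
set_option maxRecDepth 4000 in
lemma countBits_byte (n : Nat) (h : n < 256) : pvCountBits (n : Int) 8 = pvBinGo n n := by
  revert h; revert n; decide

-- A's countBits(x, 8) is the popcount of x's low byte
lemma countBits_eq_pop (x : Int) : pvCountBits x 8 = pvBinOnes (x % 256).toNat := by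
  rw [countBits_emod]
  have hnn : (0 : Int) ≤ x % 256 := Int.emod_nonneg x (by norm_num)
  have hlt : x % 256 < 256 := Int.emod_lt_of_pos x (by norm_num)
  have hcast : x % 256 = (((x % 256).toNat : Nat) : Int) := by omega
  rw [hcast, countBits_byte _ (by omega)]
  rfl

-- pvBinGo only needs fuel ≥ n
lemma pvBinGo_congr : ∀ f1 f2 n : Nat, n ≤ f1 → n ≤ f2 → pvBinGo f1 n = pvBinGo f2 n := by
  intro f1
  induction f1 with
  | zero =>
    intro f2 n h1 _
    have : n = 0 := by omega
    subst this
    cases f2 <;> simp [pvBinGo]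
  | succ f ih =>
    intro f2 n h1 h2
    cases f2 with
    | zero =>
      have : n = 0 := by omega
      subst this
      simp [pvBinGo]
    | succ f2' =>
      by_cases hn : n = 0
      · subst hn; simp [pvBinGo]
      · simp only [pvBinGo, if_neg hn]
        congr 1
        exact ih f2' (n / 2) (by omega) (by omega)

-- the unfolding equation of the popcount (also valid at 0)
lemma pvBinOnes_unfold (n : Nat) : pvBinOnes n = ((n % 2 : Nat) : Int) + pvBinOnes (n / 2) := by
  cases n with
  | zero => simp [pvBinOnes, pvBinGo]
  | succ m =>
    show pvBinGo (m + 1) (m + 1) = _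
    simp only [pvBinGo, if_neg (Nat.succ_ne_zero m)]
    congr 1
    exact pvBinGo_congr m ((m + 1) / 2) ((m + 1) / 2) (by omega) (by omega)

-- popcount is additive across a split at bit k
lemma pop_add_mul : ∀ k a b : Nat, a < 2 ^ k → pvBinOnes (a + b * 2 ^ k) = pvBinOnes a + pvBinOnes b := by
  intro k
  induction k with
  | zero =>
    intro a b ha
    have : a = 0 := by omega
    subst this
    simp [pvBinOnes, pvBinGo]
  | succ k ih =>
    intro a b ha
    rw [pvBinOnes_unfold (a + b * 2 ^ (k + 1)), pvBinOnes_unfold a]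
    have e1 : b * 2 ^ (k + 1) = (b * 2 ^ k) * 2 := by ring
    have h1 : (a + b * 2 ^ (k + 1)) % 2 = a % 2 := by rw [e1]; omega
    have h2 : (a + b * 2 ^ (k + 1)) / 2 = a / 2 + b * 2 ^ k := by rw [e1]; omega
    rw [h1, h2, ih (a / 2) b (by omega)]
    ring

-- split one base-256 digit off the popcount
lemma pop_split (a b : Nat) (h : b < 256) : pvBinOnes (a * 256 + b) = pvBinOnes b + pvBinOnes a := by
  have := pop_add_mul 8 b a (by norm_num; omega)
  simpa [Nat.add_comm] using this

-- popcount of a byte lies in [0, 8]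
set_option maxRecDepth 16000 in
lemma pop_byte_bounds (n : Nat) (h : n < 256) : 0 ≤ pvBinOnes n ∧ pvBinOnes n ≤ 8 := by
  revert h; revert n
  decide

-- XOR with 255 of a small nonnegative number is 255 minus it
set_option maxRecDepth 8000 in
lemma bxor_255 (n : Nat) (h : n < 64) : PySem.Int.bxor 255 (n : Int) = 255 - (n : Int) := by
  revert h; revert n
  decide

-- ===== VERDICT (by name: the statement is the Claim_ definition above) =====
theorem calcSectionChecksum_spec : Claim_equal_calcSectionChecksum := by
  intro section_ _hdom hpre
  unfold Pre_calcSectionChecksum at hpre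
  match section_, hpre with
  | a :: b :: c :: d :: e :: f :: g :: t, _ =>
    unfold Spec_calcSectionChecksum calcSectionChecksum calcSectionChecksum_alt
    have hr : PySem.List.pyRange 3 7 1 = [3, 4, 5, 6] := by decide
    have hsr0 : b >>> (0 : Nat) = b := by simp
    simp [hr, pysem, List.getD]
    have hb15c : PySem.Int.band 15 (c >>> (4 : Nat)) = (c >>> (4 : Nat)) % 16 := by
      rw [PySem.Int.band_comm]; exact band15_eq_emod _
    simp only [band255_eq_emod, band15_eq_emod, hb15c, countBits_eq_pop]
    have hm1 : (b % 16) % 256 = b % 16 := by omega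
    have hm2 : ((c >>> (4 : Nat)) % 16) % 256 = (c >>> (4 : Nat)) % 16 := by omega
    rw [hm1, hm2]
    obtain ⟨n0, hn0, hc0⟩ : ∃ n : Nat, (n : Int) = a % 256 ∧ n < 256 :=
      ⟨(a % 256).toNat, by omega, by omega⟩
    obtain ⟨n1, hn1, hc1⟩ : ∃ n : Nat, (n : Int) = b % 16 ∧ n < 256 :=
      ⟨(b % 16).toNat, by omega, by omega⟩
    obtain ⟨n2, hn2, hc2⟩ : ∃ n : Nat, (n : Int) = (c >>> (4 : Nat)) % 16 ∧ n < 256 :=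
      ⟨((c >>> (4 : Nat)) % 16).toNat, by omega, by omega⟩
    obtain ⟨n3, hn3, hc3⟩ : ∃ n : Nat, (n : Int) = d % 256 ∧ n < 256 :=
      ⟨(d % 256).toNat, by omega, by omega⟩
    obtain ⟨n4, hn4, hc4⟩ : ∃ n : Nat, (n : Int) = e % 256 ∧ n < 256 :=
      ⟨(e % 256).toNat, by omega, by omega⟩
    obtain ⟨n5, hn5, hc5⟩ : ∃ n : Nat, (n : Int) = f % 256 ∧ n < 256 :=
      ⟨(f % 256).toNat, by omega, by omega⟩
    obtain ⟨n6, hn6, hc6⟩ : ∃ n : Nat, (n : Int) = g % 256 ∧ n < 256 :=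
      ⟨(g % 256).toNat, by omega, by omega⟩
    rw [← hn0, ← hn1, ← hn2, ← hn3, ← hn4, ← hn5, ← hn6]
    simp only [Int.toNat_natCast]
    have hcomb : ((((((n0 : Int) * 256 + (n1 : Int)) * 256 + (n2 : Int)) * 256 + (n3 : Int)) * 256 + (n4 : Int)) * 256 + (n5 : Int)) * 256 + (n6 : Int)
        = ((((((((n0 * 256 + n1) * 256 + n2) * 256 + n3) * 256 + n4) * 256 + n5) * 256 + n6) : Nat) : Int) := by
      push_cast
      ring
    rw [hcomb, Int.toNat_natCast]
    rw [pop_split _ n6 hc6, pop_split _ n5 hc5, pop_split _ n4 hc4, pop_split _ n3 hc3,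
        pop_split _ n2 hc2, pop_split _ n1 hc1]
    have p0 := pop_byte_bounds n0 hc0
    have p1 := pop_byte_bounds n1 hc1
    have p2 := pop_byte_bounds n2 hc2
    have p3 := pop_byte_bounds n3 hc3
    have p4 := pop_byte_bounds n4 hc4
    have p5 := pop_byte_bounds n5 hc5
    have p6 := pop_byte_bounds n6 hc6
    set q0 := pvBinOnes n0 with hq0
    set q1 := pvBinOnes n1 with hq1
    set q2 := pvBinOnes n2 with hq2
    set q3 := pvBinOnes n3 with hq3
    set q4 := pvBinOnes n4 with hq4
    set q5 := pvBinOnes n5 with hq5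
    set q6 := pvBinOnes n6 with hq6
    obtain ⟨m, hm, hmlt⟩ : ∃ m : Nat, (m : Int) = q0 + q1 + q2 + q3 + q4 + q5 + q6 ∧ m < 64 :=
      ⟨(q0 + q1 + q2 + q3 + q4 + q5 + q6).toNat, by omega, by omega⟩
    rw [show (q0 + q1 + q2 + q3 + q4 + q5 + q6 : Int) = (m : Int) from hm.symm, bxor_255 m hmlt]
    omega
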